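-- pv_equiv track=rewrite | github.com/wolfvoid/FashionMV | procir/chat_utils.py | patch_think_tokens
-- ===== SOURCE A (Python) =====
-- _ASSISTANT_PREFIX = "<|im_start|>assistant\n"
--
-- _THINK_BLOCK = "<think>\n\n</think>\n\n"
--
-- def patch_think_tokens(text_str: str) -> str:
--     """Ensure every assistant turn starts with <think>...</think>."""
--     parts = text_str.split(_ASSISTANT_PREFIX)
--     if len(parts) <= 1:
--         return text_str
--     result = parts[0]
--     for part in parts[1:]:
--         result += _ASSISTANT_PREFIX
--         if not part.startswith("<think>"):
--             result += _THINK_BLOCK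
--         result += part
--     return result
-- ===== SOURCE B (Python) =====
-- _ASSISTANT_PREFIX = "<|im_start|>assistant\n"
--
-- _THINK_BLOCK = "<think>\n\n</think>\n\n"
--
-- def patch_think_tokens(text_str: str) -> str:
--     """Single left-to-right scan: copy characters, and at each occurrence of the
--     assistant prefix emit the prefix plus (if needed) the think block."""
--     out = []
--     i = 0
--     n = len(text_str)
--     plen = len(_ASSISTANT_PREFIX)
--     while i < n:
--         if text_str.startswith(_ASSISTANT_PREFIX, i):
--             out.append(_ASSISTANT_PREFIX)
--             i += plen
--             if not text_str.startswith("<think>", i):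
--                 out.append(_THINK_BLOCK)
--         else:
--             out.append(text_str[i])
--             i += 1
--     return "".join(out)
-- ===== Notes on version B (the rewrite author's own statement) =====
-- stated objective: alternative
-- what changed: Replaces split-into-parts plus a rebuild loop with a single left-to-right scan that matches the assistant prefix in place and inserts the think block as it copies.
import Mathlib
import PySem

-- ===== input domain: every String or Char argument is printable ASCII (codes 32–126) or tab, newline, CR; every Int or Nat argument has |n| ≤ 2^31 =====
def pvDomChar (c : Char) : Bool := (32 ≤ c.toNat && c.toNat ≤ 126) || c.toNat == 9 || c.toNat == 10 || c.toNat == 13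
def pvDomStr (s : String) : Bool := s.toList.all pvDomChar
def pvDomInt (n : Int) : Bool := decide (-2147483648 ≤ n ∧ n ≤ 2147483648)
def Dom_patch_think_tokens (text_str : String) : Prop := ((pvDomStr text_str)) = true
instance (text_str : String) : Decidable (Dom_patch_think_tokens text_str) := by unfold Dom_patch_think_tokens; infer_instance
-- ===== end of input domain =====

-- B replaces A's split-and-rebuild with a single in-place scan; same cost, alternative structure.

def pvPrefix : List Char := "<|im_start|>assistant\n".toList
def pvThink : List Char := "<think>\n\n</think>\n\n".toList
def pvThinkPre : List Char := "<think>".toList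

-- ===== PORT A =====
-- parts = text_str.split(_ASSISTANT_PREFIX); if len(parts) <= 1: return text_str;
-- result = parts[0]; for part in parts[1:]: result += prefix (+ think if needed) + part
def patch_think_tokens (text_str : String) : String :=
  let parts := PySem.Chars.splitOn text_str.toList pvPrefix
  if parts.length ≤ 1 then text_str
  else
    String.ofList ((parts.drop 1).foldl
      (fun result part =>
        result ++ pvPrefix ++
          (if !PySem.Chars.startswith part pvThinkPre then pvThink else []) ++ part)
      (parts.headD []))   -- parts[0]; split never returns an empty list

-- ===== PORT B =====
-- Source B: while i < n: if prefix matches at i, emit prefix (+ think block if remainder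
-- does not start with "<think>") and jump over it; else copy one character.
def pvScan (l : List Char) : List Char :=
  match l with
  | [] => []
  | c :: rest =>
    if pvPrefix.isPrefixOf (c :: rest) then
      let d := (c :: rest).drop pvPrefix.length
      pvPrefix ++ (if pvThinkPre.isPrefixOf d then [] else pvThink) ++ pvScan d
    else c :: pvScan rest
termination_by l.length
decreasing_by
  · simp [List.length_drop]
    have : pvPrefix.length = 22 := by decide
    omega
  · simp

def patch_think_tokens_alt (text_str : String) : String :=
  String.ofList (pvScan text_str.toList)

-- ===== PRECONDITION & SPEC =====
def Spec_patch_think_tokens (text_str : String) (out : String) : Prop := out = patch_think_tokens_alt text_str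
instance (text_str : String) (out : String) : Decidable (Spec_patch_think_tokens text_str out) := by unfold Spec_patch_think_tokens; infer_instance

-- ===== CLAIM (what is proved, stated in full; the proofs are below) =====
def Claim_equal_patch_think_tokens : Prop := ∀ (text_str : String), Dom_patch_think_tokens text_str → Spec_patch_think_tokens text_str (patch_think_tokens text_str)

-- ===== LEMMAS AND PROOFS =====

-- proof-only: the pieces text splits into at pvPrefix, fuel-free
def pvSplits (l : List Char) : List (List Char) :=
  match l with
  | [] => [[]]
  | c :: rest =>
    if pvPrefix.isPrefixOf (c :: rest) then
      [] :: pvSplits ((c :: rest).drop pvPrefix.length)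
    else
      match pvSplits rest with
      | [] => [[c]]   -- unreachable
      | q :: qs => (c :: q) :: qs
termination_by l.length
decreasing_by
  · simp [List.length_drop]
    have : pvPrefix.length = 22 := by decide
    omega
  · simp

def pvConsHead (pre : List Char) : List (List Char) → List (List Char)
  | [] => [pre]
  | h :: t => (pre ++ h) :: t

def pvStep (result part : List Char) : List Char :=
  result ++ pvPrefix ++
    (if !PySem.Chars.startswith part pvThinkPre then pvThink else []) ++ part

lemma pvSplits_cons (c : Char) (rest : List Char) :
    pvSplits (c :: rest) =
      if pvPrefix.isPrefixOf (c :: rest) then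
        [] :: pvSplits ((c :: rest).drop pvPrefix.length)
      else
        match pvSplits rest with
        | [] => [[c]]
        | q :: qs => (c :: q) :: qs := by
  rw [pvSplits.eq_def]

lemma pvScan_cons (c : Char) (rest : List Char) :
    pvScan (c :: rest) =
      if pvPrefix.isPrefixOf (c :: rest) then
        pvPrefix ++ (if pvThinkPre.isPrefixOf ((c :: rest).drop pvPrefix.length)
            then [] else pvThink) ++ pvScan ((c :: rest).drop pvPrefix.length)
      else c :: pvScan rest := by
  rw [pvScan.eq_def]

lemma pvSplits_ne_nil (l : List Char) : pvSplits l ≠ [] := by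
  rw [pvSplits.eq_def]
  match l with
  | [] => simp
  | c :: rest =>
    simp only
    split_ifs
    · simp
    · cases pvSplits rest <;> simp

lemma pvGo_eq (fuel : Nat) : ∀ (l cur : List Char) (acc : List (List Char)),
    l.length < fuel →
    PySem.Chars.splitOn.go pvPrefix fuel l cur acc
      = acc.reverse ++ pvConsHead cur.reverse (pvSplits l) := by
  induction fuel with
  | zero => intro l cur acc h; omega
  | succ f ih =>
    intro l cur acc h
    cases l with
    | nil =>
      rw [PySem.Chars.splitOn.go]
      · simp [pvSplits, pvConsHead]
      · omega
    | cons c rest =>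
      rw [PySem.Chars.splitOn.go, pvSplits_cons]
      by_cases hp : pvPrefix.isPrefixOf (c :: rest)
      · have hlen : (List.drop pvPrefix.length (c :: rest)).length < f := by
          simp only [List.length_drop, List.length_cons]
          have : pvPrefix.length = 22 := by decide
          simp only [List.length_cons] at h
          omega
        simp only [hp, if_true]
        rw [ih _ _ _ hlen]
        cases hh : pvSplits (List.drop pvPrefix.length (c :: rest)) with
        | nil => exact absurd hh (pvSplits_ne_nil _)
        | cons q qs => simp [pvConsHead]
      · have hlen : rest.length < f := by
          simp only [List.length_cons] at h; omega
        rw [Bool.not_eq_true] at hp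
        simp only [hp, Bool.false_eq_true, if_false]
        rw [ih _ _ _ hlen]
        cases hh : pvSplits rest with
        | nil => exact absurd hh (pvSplits_ne_nil _)
        | cons q qs => simp [pvConsHead]

lemma pvSplitOn_eq (s : List Char) :
    PySem.Chars.splitOn s pvPrefix = pvSplits s := by
  rw [PySem.Chars.splitOn, pvGo_eq (s.length + 1) s [] [] (by omega)]
  cases hh : pvSplits s with
  | nil => exact absurd hh (pvSplits_ne_nil _)
  | cons q qs => simp [pvConsHead]

lemma pvSplits_decomp : ∀ (l : List Char) (q : List Char) (qs : List (List Char)),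
    pvSplits l = q :: qs →
      ∃ rest, l = q ++ rest ∧ (rest = [] ∨ pvPrefix.isPrefixOf rest)
  | [], q, qs => by
    intro h
    rw [pvSplits.eq_def] at h
    simp at h
    exact ⟨[], by simp [h.1], Or.inl rfl⟩
  | c :: rest, q, qs => by
    intro h
    rw [pvSplits_cons] at h
    by_cases hp : pvPrefix.isPrefixOf (c :: rest)
    · simp only [hp, if_true] at h
      cases h
      exact ⟨c :: rest, rfl, Or.inr hp⟩
    · rw [Bool.not_eq_true] at hp
      simp only [hp, Bool.false_eq_true, if_false] at h
      cases hh : pvSplits rest with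
      | nil => exact absurd hh (pvSplits_ne_nil _)
      | cons q' qs' =>
        rw [hh] at h
        cases h
        obtain ⟨r, hr, hor⟩ := pvSplits_decomp rest _ _ hh
        exact ⟨r, by simp [hr], hor⟩
termination_by l => l.length
decreasing_by simp

lemma pvThinkCheck (d q : List Char) (qs : List (List Char)) (h : pvSplits d = q :: qs) :
    pvThinkPre.isPrefixOf d = pvThinkPre.isPrefixOf q := by
  obtain ⟨rest, hd, hor⟩ := pvSplits_decomp d q qs h
  subst hd
  by_cases hq : pvThinkPre.isPrefixOf q
  · rw [hq, List.isPrefixOf_iff_prefix]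
    rw [List.isPrefixOf_iff_prefix] at hq
    exact hq.trans (List.prefix_append _ _)
  · rw [Bool.eq_false_iff.mpr hq, ← Bool.not_eq_true, List.isPrefixOf_iff_prefix]
    rw [List.isPrefixOf_iff_prefix] at hq
    intro hpre
    by_cases h7 : pvThinkPre.length ≤ q.length
    · exact hq (List.prefix_of_prefix_length_le hpre (List.prefix_append _ _) h7)
    · rw [Nat.not_le] at h7
      have hqT : q <+: pvThinkPre :=
        List.prefix_of_prefix_length_le (List.prefix_append _ _) hpre (le_of_lt h7)
      obtain ⟨t, ht⟩ := hqT
      have htrest : t <+: rest := by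
        rw [← ht, List.prefix_append_right_inj] at hpre
        exact hpre
      have htne : t ≠ [] := by
        intro h0
        rw [h0, List.append_nil] at ht
        exact hq (ht ▸ List.prefix_refl q)
      have hrestne : rest ≠ [] := by
        intro h0
        rw [h0, List.prefix_nil] at htrest
        exact htne htrest
      have hP : pvPrefix.isPrefixOf rest := hor.resolve_left hrestne
      rw [List.isPrefixOf_iff_prefix] at hP
      have htP : t <+: pvPrefix := by
        refine List.prefix_of_prefix_length_le htrest hP ?_
        have : t.length + q.length = pvThinkPre.length := by
          rw [← ht]; simp [Nat.add_comm]
        have hT : pvThinkPre.length = 7 := by decide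
        have hPl : pvPrefix.length = 22 := by decide
        omega
      have hteq : t = pvThinkPre.drop q.length := by
        rw [← ht]; simp
      have hk : q.length < 7 := by
        have hT : pvThinkPre.length = 7 := by decide
        omega
      rw [hteq] at htP
      set k := q.length with hkdef
      interval_cases k <;> revert htP <;> decide

lemma pvStep_prepend (qs : List (List Char)) (x y : List Char) :
    qs.foldl pvStep (x ++ y) = x ++ qs.foldl pvStep y := by
  induction qs generalizing y with
  | nil => rfl
  | cons p ps ih =>
    simp only [List.foldl_cons]
    have : pvStep (x ++ y) p = x ++ pvStep y p := by simp [pvStep]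
    rw [this, ih]

lemma pvScan_eq_fold : ∀ (l : List Char),
    pvScan l = ((pvSplits l).drop 1).foldl pvStep ((pvSplits l).headD [])
  | [] => by simp [pvScan, pvSplits]
  | c :: rest => by
    rw [pvScan_cons, pvSplits_cons]
    by_cases hp : pvPrefix.isPrefixOf (c :: rest)
    · simp only [hp, if_true]
      have hrec := pvScan_eq_fold ((c :: rest).drop pvPrefix.length)
      cases hh : pvSplits ((c :: rest).drop pvPrefix.length) with
      | nil => exact absurd hh (pvSplits_ne_nil _)
      | cons q qs =>
        rw [hh] at hrec
        simp only [List.headD_cons, List.drop_one, List.tail_cons] at hrec ⊢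
        rw [hrec]
        have hthink := pvThinkCheck _ _ _ hh
        rw [hthink]
        simp only [List.foldl_cons]
        rw [show pvStep [] q
              = (pvPrefix ++ (if pvThinkPre.isPrefixOf q = true then [] else pvThink)) ++ q by
            simp only [pvStep, PySem.Chars.startswith, List.nil_append]
            by_cases hc : pvThinkPre.isPrefixOf q = true <;> simp [hc]]
        rw [pvStep_prepend]
    · rw [Bool.not_eq_true] at hp
      simp only [hp, Bool.false_eq_true, if_false]
      have hrec := pvScan_eq_fold rest
      cases hh : pvSplits rest with
      | nil => exact absurd hh (pvSplits_ne_nil _)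
      | cons q qs =>
        rw [hh] at hrec
        simp only [List.headD_cons, List.drop_one, List.tail_cons] at hrec ⊢
        rw [hrec, show (c :: q) = [c] ++ q from rfl, pvStep_prepend]
        rfl
termination_by l => l.length
decreasing_by
  · simp [List.length_drop]
    have : pvPrefix.length = 22 := by decide
    omega
  · simp

lemma pvSplits_singleton : ∀ (l q : List Char), pvSplits l = [q] → q = l
  | [], q => by intro h; rw [pvSplits.eq_def] at h; simp at h; simp [h]
  | c :: rest, q => by
    intro h
    rw [pvSplits_cons] at h
    by_cases hp : pvPrefix.isPrefixOf (c :: rest)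
    · simp only [hp, if_true] at h
      injection h with h1 h2
      exact absurd h2 (pvSplits_ne_nil ((c :: rest).drop pvPrefix.length))
    · rw [Bool.not_eq_true] at hp
      simp only [hp, Bool.false_eq_true, if_false] at h
      cases hh : pvSplits rest with
      | nil => exact absurd hh (pvSplits_ne_nil _)
      | cons q' qs' =>
        rw [hh] at h
        cases h
        have := pvSplits_singleton rest q' hh
        simp [this]
termination_by l => l.length
decreasing_by simp

-- ===== VERDICT (by name: the statement is the Claim_ definition above) =====
theorem patch_think_tokens_spec : Claim_equal_patch_think_tokens := by
  intro s _
  unfold Spec_patch_think_tokens patch_think_tokens patch_think_tokens_alt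
  rw [pvSplitOn_eq, pvScan_eq_fold]
  by_cases hlen : (pvSplits s.toList).length ≤ 1
  · simp only [hlen, if_true]
    cases hh : pvSplits s.toList with
    | nil => exact absurd hh (pvSplits_ne_nil _)
    | cons q qs =>
      rw [hh] at hlen
      simp at hlen
      subst hlen
      have := pvSplits_singleton s.toList q hh
      subst this
      simp
  · simp only [hlen, if_false]
    rfl
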